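-- pv_equiv track=rewrite | github.com/mm477706421/AlphaDou | douzero/evaluation/deep_agent.py | check_no_bombs
-- ===== SOURCE A (Python) =====
-- from collections import Counter
--
-- def check_no_bombs(cards):
--     card_counts = Counter(cards)
--     for count in card_counts.values():
--         if count == 4:
--             return False
--
--     if 20 in card_counts and 30 in card_counts:
--         return False
--
--     return True
-- ===== SOURCE B (Python) =====
-- def check_no_bombs(cards):
--     prev = 0
--     run = 0
--     for x in sorted(cards):
--         if run > 0 and x == prev:
--             run += 1
--         else:
--             if run == 4:
--                 return False
--             prev = x
--             run = 1
--     if run == 4: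
--         return False
--     return not (20 in cards and 30 in cards)
-- ===== Notes on version B (the rewrite author's own statement) =====
-- stated objective: alternative
-- what changed: Replaces the Counter hash tally plus a pass over its values by sorting a copy of the cards and scanning it once, tracking the length of each run of equal values and flagging a run of exactly four; the joker pair is checked by direct membership on the original list.
import Mathlib
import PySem

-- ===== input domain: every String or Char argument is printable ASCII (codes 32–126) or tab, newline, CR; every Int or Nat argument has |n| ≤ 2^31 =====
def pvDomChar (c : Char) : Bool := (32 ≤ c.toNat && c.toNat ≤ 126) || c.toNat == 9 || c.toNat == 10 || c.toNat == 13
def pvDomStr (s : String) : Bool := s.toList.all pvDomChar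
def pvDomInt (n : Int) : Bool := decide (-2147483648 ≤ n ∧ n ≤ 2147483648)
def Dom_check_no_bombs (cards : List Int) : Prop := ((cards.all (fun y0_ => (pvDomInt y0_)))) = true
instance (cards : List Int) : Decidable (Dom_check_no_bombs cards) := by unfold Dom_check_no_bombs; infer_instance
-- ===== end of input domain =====

-- B replaces A's Counter tally by a sort-and-scan pass over a sorted copy of the cards,
-- tracking run lengths of equal values (objective: alternative decomposition, same result).

-- ===== PORT A =====
def check_no_bombs (cards : List Int) : Bool :=
  let card_counts := PySem.Dict.counter cards
  if card_counts.values.any (fun count => count == 4) then false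
  else if card_counts.contains 20 && card_counts.contains 30 then false
  else true

-- ===== PORT B =====
-- the 'for x in sorted(cards):' loop of Source B: (remaining sorted cards, prev, run)
def scanRuns : List Int → Int → Int → Bool
  | [], _, run => run == 4
  | x :: rest, prev, run =>
    if decide (0 < run) && (x == prev) then scanRuns rest prev (run + 1)
    else if run == 4 then true
    else scanRuns rest x 1

def check_no_bombs_alt (cards : List Int) : Bool :=
  if scanRuns (PySem.List.sorted cards (fun x => x) false) 0 0 then false
  else !(cards.contains 20 && cards.contains 30)

-- ===== PRECONDITION & SPEC =====
def Spec_check_no_bombs (cards : List Int) (out : Bool) : Prop := out = check_no_bombs_alt cards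
instance (cards : List Int) (out : Bool) : Decidable (Spec_check_no_bombs cards out) := by unfold Spec_check_no_bombs; infer_instance

-- ===== CLAIM (what is proved, stated in full; the proofs are below) =====
def Claim_equal_check_no_bombs : Prop := ∀ (cards : List Int), Dom_check_no_bombs cards → Spec_check_no_bombs cards (check_no_bombs cards)

-- ===== LEMMAS AND PROOFS =====

theorem count_cons_ne (x c : Int) (rest : List Int) (h : c ≠ x) :
    (x :: rest).count c = rest.count c := by
  have h' : ¬ x = c := fun he => h he.symm
  simp [h']

theorem exists_count_cons (x : Int) (rest : List Int) :
    (∃ c ∈ x :: rest, (x :: rest).count c = 4) ↔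
      ((1 : Int) + (rest.count x : Int) = 4 ∨ ∃ c ∈ rest, c ≠ x ∧ rest.count c = 4) := by
  constructor
  · rintro ⟨c, hc, h4⟩
    by_cases hx : c = x
    · subst hx
      left
      rw [List.count_cons_self] at h4
      omega
    · right
      refine ⟨c, ?_, hx, ?_⟩
      · rcases List.mem_cons.mp hc with h | h
        · exact absurd h hx
        · exact h
      · rwa [count_cons_ne x c rest hx] at h4
  · rintro (h1 | ⟨c, hc, hcx, h4⟩)
    · refine ⟨x, List.mem_cons_self, ?_⟩
      rw [List.count_cons_self]
      omega
    · exact ⟨c, List.mem_cons_of_mem _ hc, by rwa [count_cons_ne x c rest hcx]⟩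

-- on a sorted list the run scan decides "some value occurs exactly 4 times"
theorem scanRuns_pos (l : List Int) (prev r : Int) (hs : l.Pairwise (· ≤ ·))
    (hge : ∀ x ∈ l, prev ≤ x) (hr : 0 < r) :
    scanRuns l prev r =
      decide ((r + (l.count prev : Int) = 4) ∨ ∃ c ∈ l, c ≠ prev ∧ l.count c = 4) := by
  induction l generalizing prev r with
  | nil =>
    rw [scanRuns]
    apply Bool.eq_iff_iff.mpr
    simp
  | cons x rest ih =>
    have hrest : rest.Pairwise (· ≤ ·) := (List.pairwise_cons.mp hs).2
    have hxle : ∀ y ∈ rest, x ≤ y := (List.pairwise_cons.mp hs).1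
    rw [scanRuns]
    by_cases hxp : x = prev
    · subst hxp
      rw [if_pos (by simp [hr])]
      rw [ih x (r + 1) hrest hxle (by omega)]
      apply Bool.eq_iff_iff.mpr
      simp only [decide_eq_true_eq]
      rw [List.count_cons_self]
      constructor
      · rintro (h | ⟨c, hc, hcx, h4⟩)
        · left; push_cast; omega
        · right; exact ⟨c, List.mem_cons_of_mem _ hc, hcx, by rwa [count_cons_ne x c rest hcx]⟩
      · rintro (h | ⟨c, hc, hcx, h4⟩)
        · left; push_cast at h ⊢; omega
        · right
          refine ⟨c, ?_, hcx, ?_⟩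
          · rcases List.mem_cons.mp hc with h' | h'
            · exact absurd h' hcx
            · exact h'
          · rwa [count_cons_ne x c rest hcx] at h4
    · have hlt : prev < x := lt_of_le_of_ne (hge x List.mem_cons_self) (fun h => hxp h.symm)
      have hnotin : prev ∉ x :: rest := by
        intro hmem
        rcases List.mem_cons.mp hmem with h | h
        · omega
        · have := hxle prev h; omega
      have hcount0 : (x :: rest).count prev = 0 := List.count_eq_zero.mpr hnotin
      rw [if_neg (by simp [hxp])]
      by_cases hr4 : r = 4
      · rw [if_pos (by simp [hr4])]
        symm
        simp only [decide_eq_true_eq]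
        left
        rw [hcount0]
        omega
      · rw [if_neg (by simp [hr4])]
        rw [ih x 1 hrest hxle (by omega)]
        apply Bool.eq_iff_iff.mpr
        simp only [decide_eq_true_eq]
        rw [hcount0]
        constructor
        · intro h
          right
          obtain ⟨c, hc, h4⟩ := (exists_count_cons x rest).mpr h
          refine ⟨c, hc, fun hcp => hnotin (hcp ▸ hc), h4⟩
        · rintro (h | ⟨c, hc, _, h4⟩)
          · exact absurd (by push_cast at h; omega) hr4
          · exact (exists_count_cons x rest).mp ⟨c, hc, h4⟩

theorem scanRuns_zero (l : List Int) (p : Int) (hs : l.Pairwise (· ≤ ·)) :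
    scanRuns l p 0 = decide (∃ c ∈ l, l.count c = 4) := by
  cases l with
  | nil => rw [scanRuns]; simp
  | cons x rest =>
    have hrest : rest.Pairwise (· ≤ ·) := (List.pairwise_cons.mp hs).2
    have hxle : ∀ y ∈ rest, x ≤ y := (List.pairwise_cons.mp hs).1
    rw [scanRuns]
    rw [if_neg (by simp), if_neg (by simp)]
    rw [scanRuns_pos rest x 1 hrest hxle (by omega)]
    apply Bool.eq_iff_iff.mpr
    simp only [decide_eq_true_eq]
    exact (exists_count_cons x rest).symm

-- A decides the same predicate, via the Counter
theorem portA_eq (cards : List Int) :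
    check_no_bombs cards =
      (decide (∀ c ∈ cards, cards.count c ≠ 4) && !(cards.contains 20 && cards.contains 30)) := by
  have hv : (PySem.Dict.counter cards).values
      = (PySem.Set.ofList cards).map (fun k => (cards.count k : Int)) := by
    simp [PySem.Dict.values, PySem.Dict.items_counter]
  have hany : ((PySem.Dict.counter cards).values.any (fun count => count == 4))
      = decide (∃ c ∈ cards, cards.count c = 4) := by
    rw [hv, List.any_map]
    apply Bool.eq_iff_iff.mpr
    simp only [List.any_eq_true, decide_eq_true_eq, Function.comp_apply]
    constructor
    · rintro ⟨x, hx, hx4⟩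
      exact ⟨x, (PySem.Set.mem_ofList _ _).mp hx, by exact_mod_cast (beq_iff_eq.mp hx4)⟩
    · rintro ⟨c, hc, h4⟩
      exact ⟨c, (PySem.Set.mem_ofList _ _).mpr hc, by simp [h4]⟩
  have key : check_no_bombs cards =
      (if ((PySem.Dict.counter cards).values.any (fun count => count == 4)) then false
       else if ((PySem.Dict.counter cards).contains 20 && (PySem.Dict.counter cards).contains 30)
       then false else true) := rfl
  rw [key, hany]
  simp only [PySem.Dict.contains_counter]
  by_cases hex : ∃ c ∈ cards, cards.count c = 4
  · have hnall : ¬ (∀ c ∈ cards, cards.count c ≠ 4) := by push Not; exact hex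
    simp [hex, hnall]
  · have hall : ∀ c ∈ cards, cards.count c ≠ 4 := by push Not at hex; exact hex
    simp [hex]
    exact fun _ => hall

-- ===== VERDICT (by name: the statement is the Claim_ definition above) =====
theorem check_no_bombs_spec : Claim_equal_check_no_bombs := by
  intro cards _
  show check_no_bombs cards = check_no_bombs_alt cards
  have hperm : (PySem.List.sorted cards (fun x => x) false).Perm cards :=
    PySem.List.sorted_perm cards (fun x => x) false
  have hsorted : (PySem.List.sorted cards (fun x => x) false).Pairwise (· ≤ ·) :=
    PySem.List.sorted_pairwise cards (fun x => x)
  have hscan : scanRuns (PySem.List.sorted cards (fun x => x) false) 0 0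
      = decide (∃ c ∈ cards, cards.count c = 4) := by
    rw [scanRuns_zero _ 0 hsorted]
    apply Bool.eq_iff_iff.mpr
    simp only [decide_eq_true_eq]
    constructor
    · rintro ⟨c, hc, h4⟩
      exact ⟨c, hperm.mem_iff.mp hc, by rwa [hperm.count_eq] at h4⟩
    · rintro ⟨c, hc, h4⟩
      exact ⟨c, hperm.mem_iff.mpr hc, by rwa [hperm.count_eq]⟩
  rw [portA_eq, check_no_bombs_alt, hscan]
  by_cases hex : ∃ c ∈ cards, cards.count c = 4
  · have hnall : ¬ (∀ c ∈ cards, cards.count c ≠ 4) := by push Not; exact hex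
    simp [hex, hnall]
  · have hall : ∀ c ∈ cards, cards.count c ≠ 4 := by push Not at hex; exact hex
    simp [hex]
    exact fun _ => hall
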